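-- pv_equiv track=rewrite | github.com/jsun-dev/capstone-experiment | ImprovedSegmentation/align.py | get_cardinal
-- ===== SOURCE A (Python) =====
-- def get_cardinal(pts, direction):
--     sums = []
--     for p in pts:
--         if direction == 'x':
--             sums.append(p[0])
--         elif direction == 'x+y':
--             sums.append(p[0] + p[1])
--         elif direction == 'y':
--             sums.append(p[1])
--         elif direction == '-x+y':
--             sums.append(-p[0] + p[1])
--         elif direction == '-x':
--             sums.append(-p[0])
--         elif direction == '-x-y':
--             sums.append(-p[0] - p[1])
--         elif direction == '-y':
--             sums.append(-p[1])
--         elif direction == 'x-y':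
--             sums.append(p[0] - p[1])
--     max_val = max(sums)
--     max_idx = sums.index(max_val)
--     return pts[max_idx]
-- ===== SOURCE B (Python) =====
-- def get_cardinal(pts, direction):
--     projections = {
--         'x':    lambda p: p[0],
--         'x+y':  lambda p: p[0] + p[1],
--         'y':    lambda p: p[1],
--         '-x+y': lambda p: -p[0] + p[1],
--         '-x':   lambda p: -p[0],
--         '-x-y': lambda p: -p[0] - p[1],
--         '-y':   lambda p: -p[1],
--         'x-y':  lambda p: p[0] - p[1],
--     }
--     key = projections.get(direction)
--     if key is None:
--         raise ValueError("unknown direction: %r" % (direction,))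
--     if not pts:
--         raise ValueError("get_cardinal() arg is an empty sequence")
--     best = pts[0]
--     best_val = key(best)
--     for p in pts[1:]:
--         v = key(p)
--         if v > best_val:
--             best, best_val = p, v
--     return best
-- ===== Notes on version B (the rewrite author's own statement) =====
-- stated objective: simpler
-- what changed: B looks the projection up once in a dict of lambdas and finds the first argmax in one pass over the points, instead of A's per-element if/elif chain building an intermediate sums list followed by max() and a separate .index() scan.
import Mathlib
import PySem

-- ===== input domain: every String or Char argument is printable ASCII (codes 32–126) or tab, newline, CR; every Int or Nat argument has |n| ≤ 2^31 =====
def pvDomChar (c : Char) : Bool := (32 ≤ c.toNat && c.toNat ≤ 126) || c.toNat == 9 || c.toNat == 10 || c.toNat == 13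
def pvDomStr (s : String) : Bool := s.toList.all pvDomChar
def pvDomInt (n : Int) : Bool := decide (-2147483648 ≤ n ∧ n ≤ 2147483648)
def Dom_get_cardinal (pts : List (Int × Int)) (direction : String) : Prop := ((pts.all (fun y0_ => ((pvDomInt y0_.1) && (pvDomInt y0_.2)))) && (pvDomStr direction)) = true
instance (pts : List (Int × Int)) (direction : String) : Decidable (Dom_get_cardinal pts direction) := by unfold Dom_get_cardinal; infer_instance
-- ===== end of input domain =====

-- B replaces A's per-element if/elif chain + intermediate sums list + max()/.index() scans
-- by a single-pass first-argmax loop over a projection selected once (simpler decomposition).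


-- ===== PORT A =====
def get_cardinal (pts : List (Int × Int)) (direction : String) : Int × Int :=
  let sums := pts.foldl (fun acc p =>
    if direction == "x" then acc ++ [p.1]
    else if direction == "x+y" then acc ++ [p.1 + p.2]
    else if direction == "y" then acc ++ [p.2]
    else if direction == "-x+y" then acc ++ [-p.1 + p.2]
    else if direction == "-x" then acc ++ [-p.1]
    else if direction == "-x-y" then acc ++ [-p.1 - p.2]
    else if direction == "-y" then acc ++ [-p.2]
    else if direction == "x-y" then acc ++ [p.1 - p.2]
    else acc) []
  match PySem.List.max? sums (fun v => v) with
  | none => (0, 0)      -- Python: ValueError from max([]); excluded by Pre_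
  | some max_val =>
    match PySem.List.index? sums max_val with
    | some max_idx =>
      match PySem.List.pyGet? pts (max_idx : Int) with
      | some q => q
      | none => (0, 0)  -- unreachable: max_idx < |sums| = |pts|
    | none => (0, 0)    -- unreachable: max_val ∈ sums

-- ===== PORT B =====
-- the dict of projection lambdas, looked up once with .get
def projKey? (direction : String) : Option ((Int × Int) → Int) :=
  PySem.Dict.get? (PySem.Dict.ofList
    [("x", fun (p : Int × Int) => p.1), ("x+y", fun p => p.1 + p.2),
     ("y", fun p => p.2), ("-x+y", fun p => -p.1 + p.2),
     ("-x", fun p => -p.1), ("-x-y", fun p => -p.1 - p.2),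
     ("-y", fun p => -p.2), ("x-y", fun p => p.1 - p.2)]) direction

def get_cardinal_alt (pts : List (Int × Int)) (direction : String) : Int × Int :=
  match projKey? direction with
  | none => (0, 0)      -- B raises ValueError; excluded by Pre_
  | some key =>
    match pts with
    | [] => (0, 0)      -- B raises ValueError; excluded by Pre_
    | h :: t =>         -- best = pts[0]; for p in pts[1:]: keep (best, best_val)
      (t.foldl (fun (acc : (Int × Int) × Int) p =>
        if key p > acc.2 then (p, key p) else acc) (h, key h)).1

-- ===== PRECONDITION & SPEC =====
-- Pre_ excludes exactly the inputs where A raises ValueError: empty pts, or a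
-- direction not among the eight handled strings (then sums = [] and max([]) raises).
def Pre_get_cardinal (pts : List (Int × Int)) (direction : String) : Prop :=
  pts ≠ [] ∧ direction ∈ ["x", "x+y", "y", "-x+y", "-x", "-x-y", "-y", "x-y"]
instance (pts : List (Int × Int)) (direction : String) : Decidable (Pre_get_cardinal pts direction) := by unfold Pre_get_cardinal; infer_instance

def pvWitness_get_cardinal : (List (Int × Int)) × String := ([(1, 2), (3, 4)], "x+y")

def Spec_get_cardinal (pts : List (Int × Int)) (direction : String) (out : Int × Int) : Prop := out = get_cardinal_alt pts direction
instance (pts : List (Int × Int)) (direction : String) (out : Int × Int) : Decidable (Spec_get_cardinal pts direction out) := by unfold Spec_get_cardinal; infer_instance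

-- ===== CLAIM (what is proved, stated in full; the proofs are below) =====
def Claim_equal_get_cardinal : Prop := ∀ (pts : List (Int × Int)) (direction : String), Dom_get_cardinal pts direction → Pre_get_cardinal pts direction → Spec_get_cardinal pts direction (get_cardinal pts direction)

-- ===== LEMMAS AND PROOFS =====

-- A's result, abstracted over the projection k (valid for the eight known directions)
def aRes (k : (Int × Int) → Int) (l : List (Int × Int)) : Int × Int :=
  match PySem.List.max? (l.map k) (fun v => v) with
  | none => (0, 0)
  | some m =>
    match PySem.List.index? (l.map k) m with
    | some i =>
      match PySem.List.pyGet? l (i : Int) with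
      | some q => q
      | none => (0, 0)
    | none => (0, 0)

-- B's loop, abstracted over k
def bRes (k : (Int × Int) → Int) (h : Int × Int) (t : List (Int × Int)) : Int × Int :=
  (t.foldl (fun (acc : (Int × Int) × Int) p =>
    if k p > acc.2 then (p, k p) else acc) (h, k h)).1

theorem a_append_map (k : (Int × Int) → Int) (g : List Int → (Int × Int) → List Int)
    (hg : ∀ acc p, g acc p = acc ++ [k p]) :
    ∀ (l : List (Int × Int)) (init : List Int), l.foldl g init = init ++ l.map k := by
  intro l
  induction l with
  | nil => simp
  | cons p t ih => intro init; simp [List.foldl, hg, ih]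

theorem aRes_singleton (k : (Int × Int) → Int) (h : Int × Int) : aRes k [h] = h := by
  simp [aRes, PySem.List.max?_id_cons]

theorem foldl_max_mem (x : Int) (t : List Int) :
    t.foldl max x = x ∨ t.foldl max x ∈ t := by
  induction t generalizing x with
  | nil => left; rfl
  | cons y t ih =>
    have hfold : (y :: t).foldl max x = t.foldl max (max x y) := rfl
    rcases ih (max x y) with h | h
    · rcases max_choice x y with hm | hm
      · left; rw [hfold, h, hm]
      · right; rw [hfold, h, hm]; exact List.mem_cons_self
    · right; rw [hfold]; exact List.mem_cons_of_mem _ h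

theorem aRes_step (k : (Int × Int) → Int) (h p : Int × Int) (t : List (Int × Int)) :
    aRes k (h :: p :: t) = if k p > k h then aRes k (p :: t) else aRes k (h :: t) := by
  have hmax2 : (List.map k (h :: p :: t)).foldl max (k h) -- dummy to name nothing
      = (List.map k t).foldl max (max (k h) (k p)) := by simp [List.foldl]
  split
  case isTrue hgt =>
    -- max over h::p::t equals max over p::t, and k h is never the first max
    have hm : max (k h) (k p) = k p := max_eq_right (le_of_lt hgt)
    have hle : k p ≤ (List.map k t).foldl max (k p) := (PySem.List.le_foldl_max _ _).1
    have hne : k h ≠ (List.map k t).foldl max (k p) := by omega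
    simp only [aRes, List.map, PySem.List.max?_id_cons, List.foldl, hm]
    rw [PySem.List.index?_cons_of_ne _ hne]
    have hmem : (List.map k t).foldl max (k p) ∈ k p :: List.map k t := by
      rcases foldl_max_mem (k p) (List.map k t) with h' | h' <;> simp [h']
    obtain ⟨i, hi⟩ := (PySem.List.index?_isSome_iff _ _).mpr hmem |> Option.isSome_iff_exists.mp
    rw [hi]
    simp only [Option.map_some, PySem.List.pyGet?_natCast]
    simp
  case isFalse hle =>
    have hm : max (k h) (k p) = k h := max_eq_left (by omega)
    simp only [aRes, List.map, PySem.List.max?_id_cons, List.foldl, hm]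
    by_cases hh : k h = (List.map k t).foldl max (k h)
    · -- first element is the (first) max in both lists
      rw [← hh]
      rw [PySem.List.index?_cons_self, PySem.List.index?_cons_self]
      simp
    · have hmem : (List.map k t).foldl max (k h) ∈ List.map k t := by
        rcases foldl_max_mem (k h) (List.map k t) with h' | h'
        · exact absurd h'.symm hh
        · exact h'
      have hlem : k h ≤ (List.map k t).foldl max (k h) := (PySem.List.le_foldl_max _ _).1
      have hnp : k p ≠ (List.map k t).foldl max (k h) := by omega
      rw [PySem.List.index?_cons_of_ne _ hh, PySem.List.index?_cons_of_ne _ hnp,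
          PySem.List.index?_cons_of_ne _ hh]
      obtain ⟨i, hi⟩ := (PySem.List.index?_isSome_iff _ _).mpr hmem |> Option.isSome_iff_exists.mp
      rw [hi]
      simp only [Option.map_some, PySem.List.pyGet?_natCast]
      simp

theorem bRes_step (k : (Int × Int) → Int) (h p : Int × Int) (t : List (Int × Int)) :
    bRes k h (p :: t) = if k p > k h then bRes k p t else bRes k h t := by
  simp only [bRes, List.foldl]
  split <;> simp_all

theorem main_lemma (k : (Int × Int) → Int) (t : List (Int × Int)) :
    ∀ h, aRes k (h :: t) = bRes k h t := by
  induction t with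
  | nil => intro h; simp [aRes_singleton, bRes]
  | cons p t ih =>
    intro h
    rw [aRes_step, bRes_step]
    split <;> apply ih

-- the eight direction cases: A's sums list is pts.map k and B's lookup yields k
theorem sums_x (pts : List (Int × Int)) : get_cardinal pts "x" = aRes (fun p => p.1) pts := by
  simp only [get_cardinal, aRes]
  rw [a_append_map (fun p => p.1) _ (by intro acc p; simp) pts []]
  simp
theorem sums_xy (pts : List (Int × Int)) : get_cardinal pts "x+y" = aRes (fun p => p.1 + p.2) pts := by
  simp only [get_cardinal, aRes]
  rw [a_append_map (fun p => p.1 + p.2) _ (by intro acc p; simp) pts []]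
  simp
theorem sums_y (pts : List (Int × Int)) : get_cardinal pts "y" = aRes (fun p => p.2) pts := by
  simp only [get_cardinal, aRes]
  rw [a_append_map (fun p => p.2) _ (by intro acc p; simp) pts []]
  simp
theorem sums_nxy (pts : List (Int × Int)) : get_cardinal pts "-x+y" = aRes (fun p => -p.1 + p.2) pts := by
  simp only [get_cardinal, aRes]
  rw [a_append_map (fun p => -p.1 + p.2) _ (by intro acc p; simp) pts []]
  simp
theorem sums_nx (pts : List (Int × Int)) : get_cardinal pts "-x" = aRes (fun p => -p.1) pts := by
  simp only [get_cardinal, aRes]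
  rw [a_append_map (fun p => -p.1) _ (by intro acc p; simp) pts []]
  simp
theorem sums_nxny (pts : List (Int × Int)) : get_cardinal pts "-x-y" = aRes (fun p => -p.1 - p.2) pts := by
  simp only [get_cardinal, aRes]
  rw [a_append_map (fun p => -p.1 - p.2) _ (by intro acc p; simp) pts []]
  simp
theorem sums_ny (pts : List (Int × Int)) : get_cardinal pts "-y" = aRes (fun p => -p.2) pts := by
  simp only [get_cardinal, aRes]
  rw [a_append_map (fun p => -p.2) _ (by intro acc p; simp) pts []]
  simp
theorem sums_xny (pts : List (Int × Int)) : get_cardinal pts "x-y" = aRes (fun p => p.1 - p.2) pts := by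
  simp only [get_cardinal, aRes]
  rw [a_append_map (fun p => p.1 - p.2) _ (by intro acc p; simp) pts []]
  simp

-- ===== VERDICT (by name: the statement is the Claim_ definition above) =====
theorem get_cardinal_spec : Claim_equal_get_cardinal := by
  intro pts direction _ hpre
  obtain ⟨hne, hdir⟩ := hpre
  obtain ⟨h, t, rfl⟩ : ∃ h t, pts = h :: t := by
    cases pts with
    | nil => exact absurd rfl hne
    | cons h t => exact ⟨h, t, rfl⟩
  unfold Spec_get_cardinal
  fin_cases hdir
  · rw [sums_x, main_lemma]
    have hk : projKey? "x" = some (fun p => p.1 : (Int × Int) → Int) := rfl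
    simp only [get_cardinal_alt, hk, bRes]
  · rw [sums_xy, main_lemma]
    have hk : projKey? "x+y" = some (fun p => p.1 + p.2 : (Int × Int) → Int) := rfl
    simp only [get_cardinal_alt, hk, bRes]
  · rw [sums_y, main_lemma]
    have hk : projKey? "y" = some (fun p => p.2 : (Int × Int) → Int) := rfl
    simp only [get_cardinal_alt, hk, bRes]
  · rw [sums_nxy, main_lemma]
    have hk : projKey? "-x+y" = some (fun p => -p.1 + p.2 : (Int × Int) → Int) := rfl
    simp only [get_cardinal_alt, hk, bRes]
  · rw [sums_nx, main_lemma]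
    have hk : projKey? "-x" = some (fun p => -p.1 : (Int × Int) → Int) := rfl
    simp only [get_cardinal_alt, hk, bRes]
  · rw [sums_nxny, main_lemma]
    have hk : projKey? "-x-y" = some (fun p => -p.1 - p.2 : (Int × Int) → Int) := rfl
    simp only [get_cardinal_alt, hk, bRes]
  · rw [sums_ny, main_lemma]
    have hk : projKey? "-y" = some (fun p => -p.2 : (Int × Int) → Int) := rfl
    simp only [get_cardinal_alt, hk, bRes]
  · rw [sums_xny, main_lemma]
    have hk : projKey? "x-y" = some (fun p => p.1 - p.2 : (Int × Int) → Int) := rfl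
    simp only [get_cardinal_alt, hk, bRes]
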